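-- pv_equiv track=rewrite | github.com/KaryneAlencar/python-academy | For/maior_abobora.py | maior_abobora
-- ===== SOURCE A (Python) =====
-- def maior_abobora(especie, lista_aboboras):
--     maior_abobora = 0
--     indice = -1
--     for i in range(len(lista_aboboras)):
--         for abobora in lista_aboboras[i]:
--             if abobora[1] == especie:
--                 if abobora[0] > maior_abobora:
--                     maior_abobora = abobora[0]
--                     indice = i
--     return indice
-- ===== SOURCE B (Python) =====
-- def maior_abobora(especie, lista_aboboras):
--     # Pass 1: best matching weight per group (0 when a group has no pumpkin of the species).
--     best = [max([0] + [peso for peso, esp in g if esp == especie]) for g in lista_aboboras]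
--     if not best:
--         return -1
--     # Pass 2: global maximum, earliest group wins.
--     M = max(best)
--     return best.index(M) if M > 0 else -1
-- ===== Notes on version B (the rewrite author's own statement) =====
-- stated objective: alternative
-- what changed: Replaces the single inline running-max scan threading (maior, indice) through nested loops by a two-pass aggregate-then-argmax: first a per-group best list (seeded with 0), then max over that list and .index for the earliest winning group (-1 when the maximum is not positive).
import Mathlib
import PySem

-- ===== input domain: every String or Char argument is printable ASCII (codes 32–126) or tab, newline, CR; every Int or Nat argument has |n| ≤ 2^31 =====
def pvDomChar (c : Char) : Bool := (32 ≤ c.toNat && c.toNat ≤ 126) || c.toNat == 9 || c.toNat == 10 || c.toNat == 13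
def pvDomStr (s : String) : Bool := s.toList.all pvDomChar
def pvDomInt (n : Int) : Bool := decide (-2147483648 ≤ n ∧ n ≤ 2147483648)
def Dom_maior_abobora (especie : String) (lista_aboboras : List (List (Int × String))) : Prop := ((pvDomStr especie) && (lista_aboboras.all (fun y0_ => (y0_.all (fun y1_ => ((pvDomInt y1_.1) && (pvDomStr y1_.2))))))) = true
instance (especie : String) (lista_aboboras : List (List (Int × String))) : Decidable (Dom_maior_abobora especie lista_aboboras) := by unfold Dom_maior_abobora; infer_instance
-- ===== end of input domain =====

-- B replaces A's inline running-max over nested loops by a two-pass aggregate-then-argmax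
-- (per-group best list, then max + earliest index): an alternative decomposition, same cost.


-- ===== PORT A =====
-- literal transliteration: running (maior_abobora, indice) state over i in range(len) and the group's pumpkins
def maior_abobora (especie : String) (lista_aboboras : List (List (Int × String))) : Int :=
  ((PySem.List.pyRange 0 (PySem.List.len lista_aboboras) 1).foldl
    (fun (st : Int × Int) i =>
      (PySem.List.pyGetD lista_aboboras i []).foldl
        (fun (st : Int × Int) abobora =>
          if abobora.2 == especie then
            if abobora.1 > st.1 then (abobora.1, i) else st
          else st)
        st)
    ((0 : Int), (-1 : Int))).2

-- ===== PORT B =====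
-- transliteration of Source B: best-per-group list, then global max and earliest index
def maior_abobora_alt (especie : String) (lista_aboboras : List (List (Int × String))) : Int :=
  let best := lista_aboboras.map
    (fun g => (((g.filter (fun p => p.2 == especie)).map Prod.fst).foldl max (0 : Int)))
  match best with
  | [] => -1
  | b :: bs =>
    let M := bs.foldl max b
    if M > 0 then
      match PySem.List.index? best M with
      | some k => (k : Int)
      | none => -1     -- unreachable: M is an element of best
    else -1

-- ===== PRECONDITION & SPEC =====
def Spec_maior_abobora (especie : String) (lista_aboboras : List (List (Int × String))) (out : Int) : Prop := out = maior_abobora_alt especie lista_aboboras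
instance (especie : String) (lista_aboboras : List (List (Int × String))) (out : Int) : Decidable (Spec_maior_abobora especie lista_aboboras out) := by unfold Spec_maior_abobora; infer_instance

-- ===== CLAIM (what is proved, stated in full; the proofs are below) =====
def Claim_equal_maior_abobora : Prop := ∀ (especie : String) (lista_aboboras : List (List (Int × String))), Dom_maior_abobora especie lista_aboboras → Spec_maior_abobora especie lista_aboboras (maior_abobora especie lista_aboboras)

-- ===== LEMMAS AND PROOFS =====

-- B's per-group best (max of matching weights, seeded with 0)
def pvBestOf (especie : String) (g : List (Int × String)) : Int :=
  ((g.filter (fun p => p.2 == especie)).map Prod.fst).foldl max 0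

theorem pv_foldl_max_max (L : List Int) : ∀ s t : Int,
    L.foldl max (max s t) = max s (L.foldl max t) := by
  induction L with
  | nil => intro s t; rfl
  | cons a L ih =>
      intro s t
      simp only [List.foldl_cons, max_assoc, ih]

theorem pv_foldl_max_or (L : List Int) : ∀ s : Int,
    L.foldl max s = s ∨ L.foldl max s ∈ L := by
  induction L with
  | nil => intro s; left; rfl
  | cons a L ih =>
      intro s
      rcases ih (max s a) with h | h
      · rw [List.foldl_cons, h]
        rcases max_choice s a with h' | h'
        · left; exact h'
        · right; rw [h']; exact List.mem_cons_self
      · right; exact List.mem_cons_of_mem _ h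

theorem pvBestOf_nonneg (especie : String) (g : List (Int × String)) :
    0 ≤ pvBestOf especie g := by
  unfold pvBestOf
  exact (PySem.List.le_foldl_max _ 0).1

theorem pvBestOf_cons_match (especie : String) (p : Int × String) (g : List (Int × String))
    (h : (p.2 == especie) = true) :
    pvBestOf especie (p :: g) = max p.1 (pvBestOf especie g) := by
  simp only [pvBestOf, List.filter_cons, h, if_pos, List.map_cons, List.foldl_cons]
  rw [max_comm (0 : Int) p.1, pv_foldl_max_max]

theorem pvBestOf_cons_nomatch (especie : String) (p : Int × String) (g : List (Int × String))
    (h : (p.2 == especie) = false) :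
    pvBestOf especie (p :: g) = pvBestOf especie g := by
  simp [pvBestOf, h]

-- characterisation of A's inner loop over one group
theorem pv_inner_char (especie : String) (g : List (Int × String)) : ∀ (st : Int × Int) (i : Int),
    0 ≤ st.1 →
    g.foldl
      (fun (st : Int × Int) abobora =>
        if abobora.2 == especie then
          if abobora.1 > st.1 then (abobora.1, i) else st
        else st) st
    = (max st.1 (pvBestOf especie g), if st.1 < pvBestOf especie g then i else st.2) := by
  induction g with
  | nil =>
      intro st i h
      have h0 : pvBestOf especie [] = 0 := rfl
      rw [List.foldl_nil, h0, if_neg (by omega : ¬ st.1 < (0 : Int)), max_eq_left h]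
  | cons p g ih =>
      intro st i h
      rw [List.foldl_cons]
      by_cases hp : (p.2 == especie) = true
      · rw [if_pos hp, pvBestOf_cons_match especie p g hp]
        have hBg := pvBestOf_nonneg especie g
        by_cases hgt : p.1 > st.1
        · rw [if_pos hgt, ih (p.1, i) i (by omega)]
          have h2 : st.1 < max p.1 (pvBestOf especie g) := by omega
          have h1 : max st.1 (max p.1 (pvBestOf especie g)) = max p.1 (pvBestOf especie g) := by
            omega
          rw [ite_self, if_pos h2, h1]
        · rw [if_neg hgt, ih st i h]
          have h1 : max st.1 (pvBestOf especie g) = max st.1 (max p.1 (pvBestOf especie g)) := by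
            omega
          have h2 : (st.1 < pvBestOf especie g) ↔ (st.1 < max p.1 (pvBestOf especie g)) := by
            omega
          rw [h1]
          by_cases h3 : st.1 < pvBestOf especie g
          · rw [if_pos h3, if_pos (h2.mp h3)]
          · rw [if_neg h3, if_neg (fun hc => h3 (h2.mpr hc))]
      · rw [if_neg (by simpa using hp), ih st i h,
          pvBestOf_cons_nomatch especie p g (by simpa using hp)]

-- the value A's final index / B's return build from a best list and its running max
def pvIdxExpr (best : List Int) (M : Int) : Int :=
  if 0 < M then
    match PySem.List.index? best M with
    | some k => (k : Int)
    | none => -1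
  else -1

-- characterisation of A's outer loop, by induction from the right
theorem pv_outer_char (especie : String) (l : List (List (Int × String))) :
    (PySem.List.enumerate l 0).foldl
      (fun (st : Int × Int) (q : Int × List (Int × String)) =>
        q.2.foldl
          (fun (st : Int × Int) abobora =>
            if abobora.2 == especie then
              if abobora.1 > st.1 then (abobora.1, q.1) else st
            else st) st)
      ((0 : Int), (-1 : Int))
    = ((l.map (pvBestOf especie)).foldl max 0,
       pvIdxExpr (l.map (pvBestOf especie)) ((l.map (pvBestOf especie)).foldl max 0)) := by
  induction l using List.reverseRecOn with
  | nil => rfl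
  | append_singleton l g ih =>
      rw [PySem.List.enumerate_append, List.foldl_append, ih]
      have hg : PySem.List.enumerate [g] ((0 : Int) + (l.length : Int)) =
          [(((l.length : Int)), g)] := by
        simp [PySem.List.enumerate]
      rw [hg]
      simp only [List.foldl_cons, List.foldl_nil, List.map_append, List.map_cons, List.map_nil,
        List.foldl_append]
      set bs := l.map (pvBestOf especie) with hbs
      set M := bs.foldl max 0 with hM
      have hM0 : 0 ≤ M := (PySem.List.le_foldl_max bs 0).1
      rw [pv_inner_char especie g (M, pvIdxExpr bs M) (l.length : Int) hM0]
      set Bg := pvBestOf especie g with hBg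
      have hBg0 : 0 ≤ Bg := pvBestOf_nonneg especie g
      rw [Prod.mk.injEq]
      refine ⟨rfl, ?_⟩
      by_cases hlt : M < Bg
      · rw [if_pos hlt]
        have hnotin : Bg ∉ bs := by
          intro hmem
          have := (PySem.List.le_foldl_max bs 0).2 Bg hmem
          omega
        have hmax : max M Bg = Bg := by omega
        simp only [pvIdxExpr]
        rw [hmax, if_pos (by omega : (0 : Int) < Bg),
          PySem.List.index?_append_singleton_self bs Bg hnotin]
        simp [hbs]
      · rw [if_neg hlt]
        have hmax : max M Bg = M := by omega
        simp only [pvIdxExpr]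
        rw [hmax]
        by_cases hpos : 0 < M
        · have hmem : M ∈ bs := by
            rcases pv_foldl_max_or bs 0 with h | h
            · rw [← hM] at h; omega
            · rw [← hM] at h; exact h
          rw [if_pos hpos, if_pos hpos, PySem.List.index?_append_of_mem [Bg] hmem]
        · rw [if_neg hpos, if_neg hpos]

-- ===== VERDICT (by name: the statement is the Claim_ definition above) =====
theorem maior_abobora_spec : Claim_equal_maior_abobora := by
  intro especie l _
  show maior_abobora especie l = maior_abobora_alt especie l
  unfold maior_abobora
  have hA : (PySem.List.enumerate l 0).foldl
      (fun (st : Int × Int) (q : Int × List (Int × String)) =>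
        q.2.foldl
          (fun (st : Int × Int) abobora =>
            if abobora.2 == especie then
              if abobora.1 > st.1 then (abobora.1, q.1) else st
            else st) st)
      ((0 : Int), (-1 : Int))
      = (PySem.List.pyRange 0 (PySem.List.len l) 1).foldl
          (fun (st : Int × Int) i =>
            (PySem.List.pyGetD l i []).foldl
              (fun (st : Int × Int) abobora =>
                if abobora.2 == especie then
                  if abobora.1 > st.1 then (abobora.1, i) else st
                else st) st)
          ((0 : Int), (-1 : Int)) := by
    rw [PySem.List.enumerate_eq_map_pyRange l ([] : List (Int × String)), List.foldl_map]
  rw [← hA, pv_outer_char especie l]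
  unfold maior_abobora_alt
  cases l with
  | nil => rfl
  | cons g t =>
      simp only [List.map_cons, List.foldl_cons]
      have hBgeq : (((g.filter (fun p => p.2 == especie)).map Prod.fst).foldl max (0 : Int))
          = pvBestOf especie g := rfl
      have hmapt : t.map
          (fun g => (((g.filter (fun p => p.2 == especie)).map Prod.fst).foldl max (0 : Int)))
          = t.map (pvBestOf especie) := rfl
      rw [hBgeq, hmapt]
      set Bg := pvBestOf especie g with hBgdef
      set bs := t.map (pvBestOf especie) with hbs
      have hseed : bs.foldl max (max 0 Bg) = max 0 (bs.foldl max Bg) := pv_foldl_max_max bs 0 Bg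
      set MB := bs.foldl max Bg with hMB
      have hBg0 : 0 ≤ Bg := pvBestOf_nonneg especie g
      have hMB0 : Bg ≤ MB := (PySem.List.le_foldl_max bs Bg).1
      have hmaxeq : max (0 : Int) MB = MB := by omega
      simp only [pvIdxExpr]
      rw [hseed, hmaxeq]
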